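-- pv_equiv track=rewrite | github.com/mercedezvdw/ram_ah | code/algorithms/SADDA.py | create_cable_route
-- ===== SOURCE A (Python) =====
-- def create_cable_route(start_position, end_position, houses, battery, cable_routes):
--     """
--     Create cable with shortest path from start to end position
--     """
--     steps_right = 0
--     steps_left = 0
--     steps_up = 0
--     steps_down = 0
--     current_position = start_position
--
--     # Compare the x coordinates, to determine to go left or right
--     if start_position[0] < end_position[0]:
--         steps_right = end_position[0] - start_position[0]
--     elif start_position[0] > end_position[0]:
--         steps_left = start_position[0] - end_position[0]
--
--     # Compare the y coordinates, to determine to go up or down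
--     if start_position[1] < end_position[1]:
--         steps_up = end_position[1] - start_position[1]
--     elif start_position[1] > end_position[1]:
--         steps_down = start_position[1] - end_position[1]
--
--     cable_route = [current_position.copy()]
--
--     # Move on the y axis
--     for i in range(steps_up):
--         current_position = [current_position[0], current_position[1] + 1]
--         if current_position not in cable_route:
--             cable_route.append(current_position.copy())
--     for i in range(steps_down):
--         current_position = [current_position[0], current_position[1] - 1]
--         if current_position not in cable_route:
--             cable_route.append(current_position.copy())
--
--     # Move on the x axis
--     for i in range(steps_right):
--         current_position = [current_position[0] + 1, current_position[1]]
--         if current_position not in cable_route: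
--             cable_route.append(current_position.copy())
--     for i in range(steps_left):
--         current_position = [current_position[0] - 1, current_position[1]]
--         if current_position not in cable_route:
--             cable_route.append(current_position.copy())
--
--     return cable_route
-- ===== SOURCE B (Python) =====
-- def create_cable_route(start_position, end_position, houses, battery, cable_routes):
--     """Build the L-shaped route directly from its geometry: one vertical
--     segment from start to the corner, then one horizontal segment to end."""
--     sx, sy = start_position[0], start_position[1]
--     ex, ey = end_position[0], end_position[1]
--     route = [start_position[:]]
--     dy = 1 if sy <= ey else -1
--     for y in range(sy + dy, ey + dy, dy):
--         route.append([sx, y])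
--     dx = 1 if sx <= ex else -1
--     for x in range(sx + dx, ex + dx, dx):
--         route.append([x, ey])
--     return route
-- ===== Notes on version B (the rewrite author's own statement) =====
-- stated objective: faster
-- what changed: Replaces the four incremental stepping loops with a linear membership scan of the growing route at every step by two direct inclusive ranges (vertical then horizontal) computed from the endpoint geometry; no current-position state and no 'not in' scan remains.
import Mathlib
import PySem

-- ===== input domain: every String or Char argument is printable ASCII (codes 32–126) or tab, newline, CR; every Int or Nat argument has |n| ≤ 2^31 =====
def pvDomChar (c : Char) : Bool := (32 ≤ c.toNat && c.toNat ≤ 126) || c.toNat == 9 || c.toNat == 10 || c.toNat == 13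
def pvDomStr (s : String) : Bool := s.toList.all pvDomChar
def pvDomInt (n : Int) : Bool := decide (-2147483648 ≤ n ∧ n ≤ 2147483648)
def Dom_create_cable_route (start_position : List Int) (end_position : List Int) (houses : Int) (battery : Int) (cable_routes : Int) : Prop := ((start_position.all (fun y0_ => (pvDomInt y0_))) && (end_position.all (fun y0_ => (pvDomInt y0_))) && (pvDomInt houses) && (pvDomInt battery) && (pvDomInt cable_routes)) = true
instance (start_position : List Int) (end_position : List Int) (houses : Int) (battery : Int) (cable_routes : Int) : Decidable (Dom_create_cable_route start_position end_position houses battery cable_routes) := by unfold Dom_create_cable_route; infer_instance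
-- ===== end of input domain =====

-- B builds the L-shaped route directly from the endpoint geometry (two inclusive ranges)
-- instead of A's four stepping loops with a membership scan per step; objective: simpler.

-- ===== PORT A =====
-- one loop body of A: step the current position by (d0,d1), append if not already on the route
def pvStep (d0 d1 : Int) (st : List Int × List (List Int)) : List Int × List (List Int) :=
  let cur : List Int := [PySem.List.pyGetD st.1 0 0 + d0, PySem.List.pyGetD st.1 1 0 + d1]
  (cur, if cur ∈ st.2 then st.2 else st.2 ++ [cur])

def create_cable_route (start_position : List Int) (end_position : List Int) (houses : Int) (battery : Int) (cable_routes : Int) : List (List Int) :=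
  let s0 := PySem.List.pyGetD start_position 0 0
  let s1 := PySem.List.pyGetD start_position 1 0
  let e0 := PySem.List.pyGetD end_position 0 0
  let e1 := PySem.List.pyGetD end_position 1 0
  let steps_right : Int := if s0 < e0 then e0 - s0 else 0
  let steps_left  : Int := if s0 < e0 then 0 else if e0 < s0 then s0 - e0 else 0
  let steps_up    : Int := if s1 < e1 then e1 - s1 else 0
  let steps_down  : Int := if s1 < e1 then 0 else if e1 < s1 then s1 - e1 else 0
  let st0 : List Int × List (List Int) := (start_position, [start_position])
  let st1 := (PySem.List.pyRange 0 steps_up 1).foldl (fun st _ => pvStep 0 1 st) st0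
  let st2 := (PySem.List.pyRange 0 steps_down 1).foldl (fun st _ => pvStep 0 (-1) st) st1
  let st3 := (PySem.List.pyRange 0 steps_right 1).foldl (fun st _ => pvStep 1 0 st) st2
  let st4 := (PySem.List.pyRange 0 steps_left 1).foldl (fun st _ => pvStep (-1) 0 st) st3
  st4.2

-- ===== PORT B =====
-- vertical segment of B: points [x, yy] for yy from y (exclusive) towards ey (inclusive)
def pvVSeg (x y ey : Int) : List (List Int) :=
  let dy : Int := if y ≤ ey then 1 else -1
  (PySem.List.pyRange (y + dy) (ey + dy) dy).map (fun yy => [x, yy])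

-- horizontal segment of B: points [xx, ey] for xx from x (exclusive) towards ex (inclusive)
def pvHSeg (x ex ey : Int) : List (List Int) :=
  let dx : Int := if x ≤ ex then 1 else -1
  (PySem.List.pyRange (x + dx) (ex + dx) dx).map (fun xx => [xx, ey])

def create_cable_route_alt (start_position : List Int) (end_position : List Int) (houses : Int) (battery : Int) (cable_routes : Int) : List (List Int) :=
  let sx := PySem.List.pyGetD start_position 0 0
  let sy := PySem.List.pyGetD start_position 1 0
  let ex := PySem.List.pyGetD end_position 0 0
  let ey := PySem.List.pyGetD end_position 1 0
  start_position :: (pvVSeg sx sy ey ++ pvHSeg sx ex ey)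

-- ===== PRECONDITION & SPEC =====
-- Pre_ excludes start/end lists with fewer than 2 elements, on which Python A raises IndexError.
def Pre_create_cable_route (start_position : List Int) (end_position : List Int) (houses : Int) (battery : Int) (cable_routes : Int) : Prop :=
  2 ≤ start_position.length ∧ 2 ≤ end_position.length
instance (start_position : List Int) (end_position : List Int) (houses : Int) (battery : Int) (cable_routes : Int) : Decidable (Pre_create_cable_route start_position end_position houses battery cable_routes) := by unfold Pre_create_cable_route; infer_instance

def pvWitness_create_cable_route : List Int × List Int × Int × Int × Int := ([0, 0], [2, 3], 0, 0, 0)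

def Spec_create_cable_route (start_position : List Int) (end_position : List Int) (houses : Int) (battery : Int) (cable_routes : Int) (out : List (List Int)) : Prop := out = create_cable_route_alt start_position end_position houses battery cable_routes
instance (start_position : List Int) (end_position : List Int) (houses : Int) (battery : Int) (cable_routes : Int) (out : List (List Int)) : Decidable (Spec_create_cable_route start_position end_position houses battery cable_routes out) := by unfold Spec_create_cable_route; infer_instance

-- ===== CLAIM (what is proved, stated in full; the proofs are below) =====
def Claim_equal_create_cable_route : Prop := ∀ (start_position : List Int) (end_position : List Int) (houses : Int) (battery : Int) (cable_routes : Int), Dom_create_cable_route start_position end_position houses battery cable_routes → Pre_create_cable_route start_position end_position houses battery cable_routes → Spec_create_cable_route start_position end_position houses battery cable_routes (create_cable_route start_position end_position houses battery cable_routes)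

-- ===== LEMMAS AND PROOFS =====

lemma pvFoldl_const {α β : Type} (f : β → β) (l : List α) (b : β) :
    l.foldl (fun st _ => f st) b = f^[l.length] b := by
  induction l generalizing b with
  | nil => rfl
  | cons x xs ih => simp [ih, Function.iterate_succ_apply]

-- m iterations of a single-direction step, given the new points are never already on the route
lemma pvIter (d0 d1 : Int) (m : Nat) (x y : Int) (cur : List Int) (R : List (List Int))
    (h0 : PySem.List.pyGetD cur 0 0 = x) (h1 : PySem.List.pyGetD cur 1 0 = y)
    (hd : (d0 = 0 ∧ (d1 = 1 ∨ d1 = -1)) ∨ (d1 = 0 ∧ (d0 = 1 ∨ d0 = -1)))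
    (hmem : ∀ j : Int, 0 ≤ j → j < (m : Int) → [x + d0 * (j + 1), y + d1 * (j + 1)] ∉ R) :
    (pvStep d0 d1)^[m] (cur, R)
      = ((if m = 0 then cur else [x + d0 * (m : Int), y + d1 * (m : Int)]),
         R ++ (PySem.List.pyRange 0 (m : Int) 1).map (fun k => [x + d0 * (k + 1), y + d1 * (k + 1)])) := by
  induction m with
  | zero => simp [PySem.List.pyRange_one_eq_nil]
  | succ n ih =>
    rw [Function.iterate_succ_apply', ih (fun j hj hj' => hmem j hj (by push_cast; omega))]
    have hget0 : PySem.List.pyGetD (if n = 0 then cur else [x + d0 * (n : Int), y + d1 * (n : Int)]) 0 0 = x + d0 * (n : Int) := by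
      by_cases hn : n = 0
      · simp [hn, h0]
      · simp [hn, PySem.List.pyGetD_zero_cons]
    have hget1 : PySem.List.pyGetD (if n = 0 then cur else [x + d0 * (n : Int), y + d1 * (n : Int)]) 1 0 = y + d1 * (n : Int) := by
      by_cases hn : n = 0
      · simp [hn, h1]
      · rw [if_neg hn]; rfl
    have hnew : [x + d0 * (n:Int) + d0, y + d1 * (n:Int) + d1]
        ∉ R ++ (PySem.List.pyRange 0 (n : Int) 1).map (fun k => [x + d0 * (k + 1), y + d1 * (k + 1)]) := by
      simp only [List.mem_append, List.mem_map, PySem.List.mem_pyRange_one]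
      rintro (hin | ⟨k, ⟨hk0, hkn⟩, heq⟩)
      · apply hmem (n : Int) (by positivity) (by push_cast; omega)
        have e : ([x + d0 * ((n:Int) + 1), y + d1 * ((n:Int) + 1)] : List Int)
            = [x + d0 * (n:Int) + d0, y + d1 * (n:Int) + d1] := by
          simp only [List.cons.injEq, and_true]; constructor <;> ring
        rw [e]; exact hin
      · simp only [List.cons.injEq, and_true] at heq
        obtain ⟨ha, hb⟩ := heq
        have hk1 : k + 1 ≠ (n : Int) + 1 := by omega
        rcases hd with ⟨h0', h1'⟩ | ⟨h1', h0'⟩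
        · have hne : d1 ≠ 0 := by rcases h1' with rfl | rfl <;> decide
          exact hk1 (mul_left_cancel₀ hne (by linear_combination hb))
        · have hne : d0 ≠ 0 := by rcases h0' with rfl | rfl <;> decide
          exact hk1 (mul_left_cancel₀ hne (by linear_combination ha))
    simp only [pvStep, hget0, hget1, if_neg hnew]
    have hrange : PySem.List.pyRange 0 ((n : Int) + 1) 1 = PySem.List.pyRange 0 (n : Int) 1 ++ [(n : Int)] :=
      PySem.List.pyRange_one_succ_right (by positivity)
    push_cast
    rw [hrange, List.map_append, ← List.append_assoc]
    simp only [Prod.mk.injEq, List.map_cons, List.map_nil, List.cons.injEq, and_true,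
      List.append_cancel_left_eq]
    refine ⟨?_, by ring, by ring⟩
    exact ⟨by ring, by ring⟩

lemma pvVSeg_up (x y ey : Int) (h : y ≤ ey) :
    pvVSeg x y ey = (PySem.List.pyRange 0 (ey - y) 1).map (fun k => [x + 0 * (k + 1), y + 1 * (k + 1)]) := by
  simp only [pvVSeg, if_pos h]
  rw [PySem.List.pyRange_one, PySem.List.pyRange_one, List.map_map, List.map_map]
  have he : (ey + 1 - (y + 1)).toNat = (ey - y - 0).toNat := by omega
  rw [he]
  refine List.map_congr_left ?_
  intro k _
  simp only [Function.comp_apply, List.cons.injEq, and_true]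
  exact ⟨by ring, by ring⟩

lemma pvVSeg_down (x y ey : Int) (h : ey < y) :
    pvVSeg x y ey = (PySem.List.pyRange 0 (y - ey) 1).map (fun k => [x + 0 * (k + 1), y + -1 * (k + 1)]) := by
  simp only [pvVSeg, if_neg (by omega : ¬ (y ≤ ey))]
  rw [PySem.List.pyRange_neg_one, PySem.List.pyRange_one, List.map_map, List.map_map]
  have he : (y + -1 - (ey + -1)).toNat = (y - ey - 0).toNat := by omega
  rw [he]
  refine List.map_congr_left ?_
  intro k _
  simp only [Function.comp_apply, List.cons.injEq, and_true]
  exact ⟨by ring, by ring⟩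

lemma pvHSeg_right (x ex ey : Int) (h : x ≤ ex) :
    pvHSeg x ex ey = (PySem.List.pyRange 0 (ex - x) 1).map (fun k => [x + 1 * (k + 1), ey + 0 * (k + 1)]) := by
  simp only [pvHSeg, if_pos h]
  rw [PySem.List.pyRange_one, PySem.List.pyRange_one, List.map_map, List.map_map]
  have he : (ex + 1 - (x + 1)).toNat = (ex - x - 0).toNat := by omega
  rw [he]
  refine List.map_congr_left ?_
  intro k _
  simp only [Function.comp_apply, List.cons.injEq, and_true]
  exact ⟨by ring, by ring⟩

lemma pvHSeg_left (x ex ey : Int) (h : ex < x) :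
    pvHSeg x ex ey = (PySem.List.pyRange 0 (x - ex) 1).map (fun k => [x + -1 * (k + 1), ey + 0 * (k + 1)]) := by
  simp only [pvHSeg, if_neg (by omega : ¬ (x ≤ ex))]
  rw [PySem.List.pyRange_neg_one, PySem.List.pyRange_one, List.map_map, List.map_map]
  have he : (x + -1 - (ex + -1)).toNat = (x - ex - 0).toNat := by omega
  rw [he]
  refine List.map_congr_left ?_
  intro k _
  simp only [Function.comp_apply, List.cons.injEq, and_true]
  exact ⟨by ring, by ring⟩

-- A's two vertical loops yield start followed by B's vertical segment
lemma pvVert (x y ey : Int) (s : List Int)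
    (h0 : PySem.List.pyGetD s 0 0 = x) (h1 : PySem.List.pyGetD s 1 0 = y) :
    ∃ cur,
      ((PySem.List.pyRange 0 (if y < ey then 0 else if ey < y then y - ey else 0) 1).foldl
          (fun st _ => pvStep 0 (-1) st)
        ((PySem.List.pyRange 0 (if y < ey then ey - y else 0) 1).foldl
          (fun st _ => pvStep 0 1 st) (s, [s])))
        = (cur, s :: pvVSeg x y ey)
      ∧ PySem.List.pyGetD cur 0 0 = x ∧ PySem.List.pyGetD cur 1 0 = ey := by
  rcases lt_trichotomy y ey with h | h | h
  · simp only [if_pos h]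
    rw [PySem.List.pyRange_one_eq_nil (le_refl (0:Int)), List.foldl_nil, pvFoldl_const,
      PySem.List.length_pyRange_one]
    have hm : ((ey - y - 0).toNat : Int) = ey - y := by omega
    have hmem : ∀ j : Int, 0 ≤ j → j < ((ey - y - 0).toNat : Int) →
        [x + 0 * (j + 1), y + 1 * (j + 1)] ∉ [s] := by
      intro j hj0 hj1
      simp only [List.mem_singleton]
      intro heq
      rw [← heq] at h1
      have : PySem.List.pyGetD [x + 0 * (j + 1), y + 1 * (j + 1)] 1 0 = y + 1 * (j + 1) := rfl
      rw [this] at h1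
      omega
    rw [pvIter 0 1 _ x y s [s] h0 h1 (Or.inl ⟨rfl, Or.inl rfl⟩) hmem]
    rw [if_neg (by omega : ¬ ((ey - y - 0).toNat = 0))]
    refine ⟨[x + 0 * (((ey - y - 0).toNat : Int)), y + 1 * (((ey - y - 0).toNat : Int))], ?_, ?_, ?_⟩
    · rw [hm, List.singleton_append, pvVSeg_up x y ey h.le]
    · show x + 0 * (((ey - y - 0).toNat : Int)) = x
      ring
    · show y + 1 * (((ey - y - 0).toNat : Int)) = ey
      omega
  · simp only [if_neg (show ¬ y < ey by omega), if_neg (show ¬ ey < y by omega)]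
    rw [PySem.List.pyRange_one_eq_nil (le_refl (0:Int))]
    refine ⟨s, ?_, h0, by rw [h1, h]⟩
    simp only [List.foldl_nil]
    have : pvVSeg x y ey = [] := by
      simp only [pvVSeg, if_pos (le_of_eq h)]
      rw [PySem.List.pyRange_one_eq_nil (by omega)]
      rfl
    rw [this]
  · simp only [if_neg (show ¬ y < ey by omega), if_pos h]
    rw [PySem.List.pyRange_one_eq_nil (le_refl (0:Int)), List.foldl_nil, pvFoldl_const,
      PySem.List.length_pyRange_one]
    have hm : ((y - ey - 0).toNat : Int) = y - ey := by omega
    have hmem : ∀ j : Int, 0 ≤ j → j < ((y - ey - 0).toNat : Int) →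
        [x + 0 * (j + 1), y + -1 * (j + 1)] ∉ [s] := by
      intro j hj0 hj1
      simp only [List.mem_singleton]
      intro heq
      rw [← heq] at h1
      have : PySem.List.pyGetD [x + 0 * (j + 1), y + -1 * (j + 1)] 1 0 = y + -1 * (j + 1) := rfl
      rw [this] at h1
      omega
    rw [pvIter 0 (-1) _ x y s [s] h0 h1 (Or.inl ⟨rfl, Or.inr rfl⟩) hmem]
    rw [if_neg (by omega : ¬ ((y - ey - 0).toNat = 0))]
    refine ⟨[x + 0 * (((y - ey - 0).toNat : Int)), y + -1 * (((y - ey - 0).toNat : Int))], ?_, ?_, ?_⟩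
    · rw [hm, List.singleton_append, pvVSeg_down x y ey h]
    · show x + 0 * (((y - ey - 0).toNat : Int)) = x
      ring
    · show y + -1 * (((y - ey - 0).toNat : Int)) = ey
      omega

-- A's two horizontal loops append B's horizontal segment (no point of R is revisited)
lemma pvHoriz (x ex ey : Int) (cur : List Int) (R : List (List Int))
    (h0 : PySem.List.pyGetD cur 0 0 = x) (h1 : PySem.List.pyGetD cur 1 0 = ey)
    (hR : ∀ z w : Int, z ≠ x → [z, w] ∉ R) :
    ((PySem.List.pyRange 0 (if x < ex then 0 else if ex < x then x - ex else 0) 1).foldl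
        (fun st _ => pvStep (-1) 0 st)
      ((PySem.List.pyRange 0 (if x < ex then ex - x else 0) 1).foldl
        (fun st _ => pvStep 1 0 st) (cur, R))).2
      = R ++ pvHSeg x ex ey := by
  rcases lt_trichotomy x ex with h | h | h
  · simp only [if_pos h]
    rw [PySem.List.pyRange_one_eq_nil (le_refl (0:Int)), List.foldl_nil, pvFoldl_const,
      PySem.List.length_pyRange_one]
    have hmem : ∀ j : Int, 0 ≤ j → j < ((ex - x - 0).toNat : Int) →
        [x + 1 * (j + 1), ey + 0 * (j + 1)] ∉ R := by
      intro j hj0 hj1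
      exact hR _ _ (by omega)
    rw [pvIter 1 0 _ x ey cur R h0 h1 (Or.inr ⟨rfl, Or.inl rfl⟩) hmem]
    show R ++ _ = R ++ pvHSeg x ex ey
    rw [pvHSeg_right x ex ey h.le]
    have hm : (((ex - x - 0).toNat : Int)) = ex - x := by omega
    rw [hm]
  · simp only [if_neg (show ¬ x < ex by omega), if_neg (show ¬ ex < x by omega)]
    rw [PySem.List.pyRange_one_eq_nil (le_refl (0:Int))]
    simp only [List.foldl_nil]
    have : pvHSeg x ex ey = [] := by
      simp only [pvHSeg, if_pos (le_of_eq h)]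
      rw [PySem.List.pyRange_one_eq_nil (by omega)]
      rfl
    rw [this, List.append_nil]
  · simp only [if_neg (show ¬ x < ex by omega), if_pos h]
    rw [PySem.List.pyRange_one_eq_nil (le_refl (0:Int)), List.foldl_nil, pvFoldl_const,
      PySem.List.length_pyRange_one]
    have hmem : ∀ j : Int, 0 ≤ j → j < ((x - ex - 0).toNat : Int) →
        [x + -1 * (j + 1), ey + 0 * (j + 1)] ∉ R := by
      intro j hj0 hj1
      exact hR _ _ (by omega)
    rw [pvIter (-1) 0 _ x ey cur R h0 h1 (Or.inr ⟨rfl, Or.inr rfl⟩) hmem]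
    show R ++ _ = R ++ pvHSeg x ex ey
    rw [pvHSeg_left x ex ey h]
    have hm : (((x - ex - 0).toNat : Int)) = x - ex := by omega
    rw [hm]

-- ===== VERDICT (by name: the statement is the Claim_ definition above) =====
theorem create_cable_route_spec : Claim_equal_create_cable_route := by
  intro s e hh bb cc _ _
  unfold Spec_create_cable_route
  unfold create_cable_route create_cable_route_alt
  obtain ⟨cur, hV, hc0, hc1⟩ := pvVert (PySem.List.pyGetD s 0 0) (PySem.List.pyGetD s 1 0)
    (PySem.List.pyGetD e 1 0) s rfl rfl
  have hR : ∀ z w : Int, z ≠ PySem.List.pyGetD s 0 0 →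
      [z, w] ∉ s :: pvVSeg (PySem.List.pyGetD s 0 0) (PySem.List.pyGetD s 1 0) (PySem.List.pyGetD e 1 0) := by
    intro z w hz hmem
    rcases List.mem_cons.mp hmem with heq | hmem'
    · exact hz (by rw [← heq, PySem.List.pyGetD_zero_cons])
    · simp only [pvVSeg, List.mem_map] at hmem'
      obtain ⟨yy, -, heq⟩ := hmem'
      simp only [List.cons.injEq, and_true] at heq
      exact hz heq.1.symm
  show (_ : List Int × List (List Int)).2 = _
  rw [hV]
  rw [pvHoriz (PySem.List.pyGetD s 0 0) (PySem.List.pyGetD e 0 0) (PySem.List.pyGetD e 1 0) cur _ hc0 hc1 hR]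
  rw [List.cons_append]
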